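-- pv_equiv track=rewrite | github.com/aiproteomics/aiproteomics | tools/psm2speclib.py | unimod_to_single_char_sequence
-- ===== SOURCE A (Python) =====
-- aa_mod_map = {
--         'M(UniMod:35)': '1',
--         'S(UniMod:21)': '2',
--         'T(UniMod:21)': '3',
--         'Y(UniMod:21)': '4',
--         '(UniMod:1)':   '*',
--         'C(UniMod:4)':  'C'
-- }
--
-- def unimod_to_single_char_sequence(seq, ignore_unsupported=False):
--     seq = seq.strip()
--     seq = seq.strip('_')
--
--     for k, v in aa_mod_map.items():
--         if '(' not in seq:
--             break
--         seq = seq.replace(k, v)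
--
--     # If there are still modifications present, then they
--     # are not supported.
--     if '(' in seq:
--         if ignore_unsupported:
--             return None
--         raise ValueError(f'Sequence {seq} contains unsupported amino acid modifications. List of supported mods: {aa_mod_map.keys()}')
--
--     return seq
-- ===== SOURCE B (Python) =====
-- aa_mod_map = {
--         'M(UniMod:35)': '1',
--         'S(UniMod:21)': '2',
--         'T(UniMod:21)': '3',
--         'Y(UniMod:21)': '4',
--         '(UniMod:1)':   '*',
--         'C(UniMod:4)':  'C'
-- }
--
-- def unimod_to_single_char_sequence(seq, ignore_unsupported=False):
--     """Single left-to-right scan: at each position emit the code of the first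
--     matching modification token, otherwise copy the character."""
--     seq = seq.strip().strip('_')
--     pieces = []
--     i, n = 0, len(seq)
--     while i < n:
--         for token, code in aa_mod_map.items():
--             if seq.startswith(token, i):
--                 pieces.append(code)
--                 i += len(token)
--                 break
--         else:
--             pieces.append(seq[i])
--             i += 1
--     res = ''.join(pieces)
--     if '(' not in res:
--         return res
--     if ignore_unsupported:
--         return None
--     raise ValueError(f'Sequence {res} contains unsupported amino acid modifications. List of supported mods: {aa_mod_map.keys()}')
-- ===== Notes on version B (the rewrite author's own statement) =====
-- stated objective: alternative
-- what changed: B replaces A's six sequential full-string str.replace passes by a single left-to-right scan that at each position emits the code of the first matching modification token (or copies the character); …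
-- outside the precondition, e.g. on unimod_to_single_char_sequence('S(UniMod:2M(UniMod:35))', True): A returns '2', B returns None; on unimod_to_single_char_sequence('S(UniMod:2M(UniMod:35))', False): A returns '2', B raises ValueError; on unimod_to_single_char_sequence('(UniMod:', False): A raises ValueError, B raises ValueError
import Mathlib
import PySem

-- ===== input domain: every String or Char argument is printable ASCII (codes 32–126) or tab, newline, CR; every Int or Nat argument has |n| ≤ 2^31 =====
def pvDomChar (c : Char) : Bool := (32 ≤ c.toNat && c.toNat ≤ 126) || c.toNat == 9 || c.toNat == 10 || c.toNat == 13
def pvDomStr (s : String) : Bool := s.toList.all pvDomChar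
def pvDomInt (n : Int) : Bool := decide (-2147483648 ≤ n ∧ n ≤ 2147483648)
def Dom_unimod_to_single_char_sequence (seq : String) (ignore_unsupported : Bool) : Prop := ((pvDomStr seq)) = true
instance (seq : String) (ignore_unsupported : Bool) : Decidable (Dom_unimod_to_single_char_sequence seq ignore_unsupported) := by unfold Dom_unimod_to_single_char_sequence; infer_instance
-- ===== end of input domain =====

-- B changes the algorithm: one left-to-right scan emitting token codes instead of six
-- sequential str.replace passes; equal on Pre_ (no cascade patterns, no ValueError).

-- ===== PORT A =====
-- aa_mod_map.items(), in dict insertion order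
def pvMap : List (String × String) :=
  [("M(UniMod:35)", "1"), ("S(UniMod:21)", "2"), ("T(UniMod:21)", "3"),
   ("Y(UniMod:21)", "4"), ("(UniMod:1)", "*"), ("C(UniMod:4)", "C")]

-- the for-loop over aa_mod_map.items() with the `if '(' not in seq: break`
def pvLoopA : List (String × String) → String → String
  | [], s => s
  | (k, v) :: rest, s =>
    if PySem.Str.isIn "(" s = false then s
    else pvLoopA rest (PySem.Str.replace s k v)

def unimod_to_single_char_sequence (seq : String) (ignore_unsupported : Bool) : Option String :=
  let s0 := PySem.Str.stripChars (PySem.Str.strip seq) "_"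
  let s1 := pvLoopA pvMap s0
  if PySem.Str.isIn "(" s1 = true then
    if ignore_unsupported then none
    else none  -- Python raises ValueError here; Pre_ excludes this branch
  else some s1

-- ===== PORT B =====
def pvPairs : List (List Char × List Char) :=
  [("M(UniMod:35)".toList, "1".toList), ("S(UniMod:21)".toList, "2".toList),
   ("T(UniMod:21)".toList, "3".toList), ("Y(UniMod:21)".toList, "4".toList),
   ("(UniMod:1)".toList, "*".toList), ("C(UniMod:4)".toList, "C".toList)]

-- the inner `for k, v in aa_mod_map.items(): if seq.startswith(k, i)` search
def pvMatch : List (List Char × List Char) → List Char → Option (List Char × List Char)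
  | [], _ => none
  | (k, v) :: rest, l => if k.isPrefixOf l then some (k, v) else pvMatch rest l

theorem pvMatch_some : ∀ (ps : List (List Char × List Char)) (l k v : List Char),
    pvMatch ps l = some (k, v) → (k, v) ∈ ps ∧ k <+: l := by
  intro ps
  induction ps with
  | nil => intro l k v h; simp [pvMatch] at h
  | cons p rest ih =>
    intro l k v h
    obtain ⟨pk, pv⟩ := p
    by_cases hp : pk.isPrefixOf l
    · simp [pvMatch, hp] at h
      obtain ⟨h1, h2⟩ := h
      subst h1; subst h2
      exact ⟨by simp, List.isPrefixOf_iff_prefix.mp hp⟩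
    · simp [pvMatch, hp] at h
      obtain ⟨h1, h2⟩ := ih l k v h
      exact ⟨by simp [h1], h2⟩

theorem pvPairs_key_ne_nil : ∀ p ∈ pvPairs, p.1 ≠ [] := by decide

-- the `while i < n` scan of Source B (i-cursor becomes the remaining suffix)
def pvScan (l : List Char) : List Char :=
  match h : pvMatch pvPairs l with
  | some (k, v) => v ++ pvScan (l.drop k.length)
  | none =>
    match l with
    | [] => []
    | c :: t => c :: pvScan t
termination_by l.length
decreasing_by
  · obtain ⟨hmem, hpre⟩ := pvMatch_some pvPairs l k v h
    have hk : k ≠ [] := pvPairs_key_ne_nil _ hmem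
    have hlen := hpre.length_le
    have h0 : 0 < k.length := List.length_pos_iff.mpr hk
    simp only [List.length_drop]
    omega
  · simp

def unimod_to_single_char_sequence_alt (seq : String) (ignore_unsupported : Bool) : Option String :=
  let s0 := PySem.Str.stripChars (PySem.Str.strip seq) "_"
  let res := pvScan s0.toList
  if PySem.Chars.isIn "(".toList res = false then some (String.ofList res)
  else if ignore_unsupported then none
  else none  -- Python raises ValueError here; Pre_ excludes this branch

-- ===== PRECONDITION & SPEC =====
def pvP8 : List Char := "(UniMod:".toList
def pvM9 : List Char := "M(UniMod:".toList

-- no '(UniMod:' starts 8-10 characters after another one (9 or 10 counted from its '(')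
def pvNoCascade (w : List Char) : Prop :=
  ∀ q ≤ w.length, ¬ (pvP8 <+: w.drop q ∧ (pvP8 <+: w.drop (q + 9) ∨ pvM9 <+: w.drop (q + 9)))

-- every '(' in w opens one of the six supported modification tokens
def pvSupported (w : List Char) : Prop :=
  ∀ q ≤ w.length, ['('] <+: w.drop q →
    ("(UniMod:1)".toList <+: w.drop q ∨
      (1 ≤ q ∧ ("M(UniMod:35)".toList <+: w.drop (q - 1) ∨ "S(UniMod:21)".toList <+: w.drop (q - 1) ∨
        "T(UniMod:21)".toList <+: w.drop (q - 1) ∨ "Y(UniMod:21)".toList <+: w.drop (q - 1) ∨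
        "C(UniMod:4)".toList <+: w.drop (q - 1))))

-- Pre_ excludes (i) the inputs on which A raises ValueError (an unsupported modification is
-- left and ignore_unsupported is false) and (ii) the degenerate strings in which a second
-- '(UniMod:' starts 8-10 characters after another, where a character substituted by one
-- replace pass can combine with the surrounding text into a later modification token, so a
-- sequential replacement and a single scan legitimately read the sequence differently — an
-- unspecified corner on which both behaviours are defensible.
def Pre_unimod_to_single_char_sequence (seq : String) (ignore_unsupported : Bool) : Prop :=
  pvNoCascade (PySem.Str.stripChars (PySem.Str.strip seq) "_").toList ∧
    (ignore_unsupported = true ∨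
      pvSupported (PySem.Str.stripChars (PySem.Str.strip seq) "_").toList)

instance (seq : String) (ignore_unsupported : Bool) :
    Decidable (Pre_unimod_to_single_char_sequence seq ignore_unsupported) := by
  unfold Pre_unimod_to_single_char_sequence pvNoCascade pvSupported; infer_instance

def pvWitness_unimod_to_single_char_sequence : String × Bool :=
  ("_M(UniMod:35)PEPS(UniMod:21)K_", false)

def Spec_unimod_to_single_char_sequence (seq : String) (ignore_unsupported : Bool)
    (out : Option String) : Prop :=
  out = unimod_to_single_char_sequence_alt seq ignore_unsupported

instance (seq : String) (ignore_unsupported : Bool) (out : Option String) :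
    Decidable (Spec_unimod_to_single_char_sequence seq ignore_unsupported out) := by
  unfold Spec_unimod_to_single_char_sequence; infer_instance

-- ===== CLAIM (what is proved, stated in full; the proofs are below) =====
def Claim_equal_unimod_to_single_char_sequence : Prop :=
  ∀ (seq : String) (ignore_unsupported : Bool),
    Dom_unimod_to_single_char_sequence seq ignore_unsupported →
    Pre_unimod_to_single_char_sequence seq ignore_unsupported →
    Spec_unimod_to_single_char_sequence seq ignore_unsupported
      (unimod_to_single_char_sequence seq ignore_unsupported)

-- ===== LEMMAS AND PROOFS =====

-- A-side reference replacer: leftmost non-overlapping single-pattern replacement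
def pvRepl : List Char → List Char → List Char → List Char
  | _, _, [] => []
  | old, new, c :: t =>
    if old ≠ [] ∧ old.isPrefixOf (c :: t) then new ++ pvRepl old new (t.drop (old.length - 1))
    else c :: pvRepl old new t
termination_by _ _ l => l.length
decreasing_by
  · simp only [List.length_drop, List.length_cons]; omega
  · simp

def pvFold (ps : List (List Char × List Char)) (l : List Char) : List Char :=
  ps.foldl (fun l p => pvRepl p.1 p.2 l) l

-- scanner over an arbitrary key list (proof generalisation of pvScan)
def pvScanP (ps : List (List Char × List Char)) : List Char → List Char
  | [] => []
  | c :: t =>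
    match pvMatch ps (c :: t) with
    | some (k, v) => v ++ pvScanP ps ((c :: t).drop (max k.length 1))
    | none => c :: pvScanP ps t
termination_by l => l.length
decreasing_by
  · simp only [List.length_drop, List.length_cons]; omega
  · simp

theorem pvRepl_nil (old new : List Char) : pvRepl old new [] = [] := by
  simp [pvRepl]

theorem pvRepl_cons_neg {old : List Char} (new : List Char) (c : Char) (t : List Char)
    (h : ¬ old <+: (c :: t)) : pvRepl old new (c :: t) = c :: pvRepl old new t := by
  rw [pvRepl]
  rw [if_neg]
  rintro ⟨-, hp⟩
  exact h (List.isPrefixOf_iff_prefix.mp hp)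

theorem pvRepl_cons_pos {old : List Char} (new : List Char) (c : Char) (t : List Char)
    (hne : old ≠ []) (h : old <+: (c :: t)) :
    pvRepl old new (c :: t) = new ++ pvRepl old new ((c :: t).drop old.length) := by
  rw [pvRepl]
  rw [if_pos ⟨hne, List.isPrefixOf_iff_prefix.mpr h⟩]
  congr 1
  cases old with
  | nil => exact absurd rfl hne
  | cons o os => simp

theorem pv_not_prefix_append {y u : List Char} (h1 : ¬ y <+: u) (h2 : ¬ u <+: y)
    (b : List Char) : ¬ y <+: (u ++ b) := by
  intro h
  rcases le_total y.length u.length with hle | hle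
  · exact h1 (List.prefix_of_prefix_length_le h (u.prefix_append b) hle)
  · exact h2 (List.prefix_of_prefix_length_le (u.prefix_append b) h hle)

theorem pvRepl_append_left (old new : List Char) :
    ∀ (a b : List Char), (∀ q < a.length, ∀ b', ¬ old <+: (a.drop q ++ b')) →
    pvRepl old new (a ++ b) = a ++ pvRepl old new b := by
  intro a
  induction a with
  | nil => intro b _; simp
  | cons c a' ih =>
    intro b h
    have h0 : ¬ old <+: (c :: (a' ++ b)) := by
      have := h 0 (by simp) b
      simpa using this
    rw [List.cons_append, pvRepl_cons_neg new c (a' ++ b) h0]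
    rw [ih b (fun q hq b' => h (q + 1) (by simpa using Nat.succ_lt_succ hq) b')]
    simp

theorem pvRepl_id (old new : List Char) :
    ∀ l, (∀ q, ¬ old <+: l.drop q) → pvRepl old new l = l := by
  intro l
  induction l with
  | nil => intro _; exact pvRepl_nil old new
  | cons c t ih =>
    intro h
    rw [pvRepl_cons_neg new c t (by simpa using h 0)]
    rw [ih (fun q => by simpa using h (q + 1))]

theorem pvFold_nil (ps : List (List Char × List Char)) : pvFold ps [] = [] := by
  induction ps with
  | nil => rfl
  | cons p rest ih => simp [pvFold, List.foldl_cons, pvRepl_nil] at ih ⊢; exact ih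

theorem pvFold_cons_step (ps : List (List Char × List Char)) (p : List Char × List Char)
    (l : List Char) : pvFold (p :: ps) l = pvFold ps (pvRepl p.1 p.2 l) := rfl

theorem pvFold_cons_step' (ps : List (List Char × List Char)) (k v : List Char)
    (l : List Char) : pvFold ((k, v) :: ps) l = pvFold ps (pvRepl k v l) := rfl

theorem pvFold_append (ps qs : List (List Char × List Char)) (l : List Char) :
    pvFold (ps ++ qs) l = pvFold qs (pvFold ps l) := by
  simp [pvFold, List.foldl_append]

-- ==== decidable facts about the six concrete keys ====

theorem pvVal_len : ∀ p ∈ pvPairs, p.2.length = 1 := by decide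

theorem pvSep : ∀ x ∈ pvPairs, ∀ y ∈ pvPairs, x.1 ≠ y.1 →
    ∀ q < x.1.length, ¬ (y.1 <+: x.1.drop q) ∧ ¬ (x.1.drop q <+: y.1) := by decide

theorem pvHeadNe : ∀ x ∈ pvPairs, ∀ y ∈ pvPairs, x ≠ y → y.1.head? ≠ x.2.head? := by decide

theorem pvNodup : pvPairs.Nodup := by decide

abbrev pvCascadePat (u : List Char) : Prop :=
  ∃ q ≤ u.length, pvP8 <+: u.drop q ∧ (pvP8 <+: u.drop (q + 9) ∨ pvM9 <+: u.drop (q + 9))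

theorem pvCF : ∀ x ∈ pvPairs, ∀ y ∈ pvPairs, ∀ a, 1 ≤ a → a < x.1.length →
    y.2 <+: x.1.drop a → pvCascadePat (x.1.take a ++ y.1) := by decide

-- ==== cascade-pattern transfer ====

theorem pvCascade_mono {u w : List Char} (hc : pvCascadePat u) (hp : u <+: w)
    (hnc : pvNoCascade w) : False := by
  obtain ⟨q, hq, h1, h2⟩ := hc
  have hlen := hp.length_le
  refine hnc q (le_trans hq hlen) ⟨h1.trans (hp.drop q), ?_⟩
  rcases h2 with h2 | h2
  · exact Or.inl (h2.trans (hp.drop (q + 9)))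
  · exact Or.inr (h2.trans (hp.drop (q + 9)))

theorem pvNoCascade_drop {l : List Char} (h : pvNoCascade l) (d : Nat) :
    pvNoCascade (l.drop d) := by
  intro q hq hbad
  rw [List.drop_drop, List.drop_drop] at hbad
  have h8 : 8 ≤ l.length - (d + q) := by
    have := hbad.1.length_le
    simpa [pvP8] using this
  refine h (d + q) (by omega) ?_
  have e : d + (q + 9) = d + q + 9 := by omega
  rwa [e] at hbad

-- ==== pvMatch lemmas ====

theorem pvMatch_none : ∀ (ps : List (List Char × List Char)) (l : List Char),
    pvMatch ps l = none → ∀ p ∈ ps, ¬ p.1 <+: l := by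
  intro ps
  induction ps with
  | nil => intro l _ p hp; simp at hp
  | cons p0 rest ih =>
    intro l h p hp
    obtain ⟨pk, pv⟩ := p0
    by_cases hpre : pk.isPrefixOf l
    · simp [pvMatch, hpre] at h
    · simp [pvMatch, hpre] at h
      rcases List.mem_cons.mp hp with h1 | h1
      · subst h1; simpa using (fun hh => hpre (List.isPrefixOf_iff_prefix.mpr hh))
      · exact ih l h p h1

theorem pvMatch_some_split : ∀ (ps : List (List Char × List Char)) (l k v : List Char),
    pvMatch ps l = some (k, v) →
    ∃ pre post, ps = pre ++ (k, v) :: post ∧ (∀ p ∈ pre, ¬ p.1 <+: l) ∧ k <+: l := by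
  intro ps
  induction ps with
  | nil => intro l k v h; simp [pvMatch] at h
  | cons p0 rest ih =>
    intro l k v h
    obtain ⟨pk, pv⟩ := p0
    by_cases hpre : pk.isPrefixOf l
    · simp [pvMatch, hpre] at h
      obtain ⟨h1, h2⟩ := h
      subst h1; subst h2
      exact ⟨[], rest, by simp, by simp, List.isPrefixOf_iff_prefix.mp hpre⟩
    · simp [pvMatch, hpre] at h
      obtain ⟨pre, post, hps, hpre2, hk⟩ := ih l k v h
      refine ⟨(pk, pv) :: pre, post, by simp [hps], ?_, hk⟩
      intro p hp
      rcases List.mem_cons.mp hp with h1 | h1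
      · subst h1; exact fun hh => hpre (List.isPrefixOf_iff_prefix.mpr hh)
      · exact hpre2 p h1

-- ==== pvScanP equations ====

theorem pvScanP_nil (ps : List (List Char × List Char)) : pvScanP ps [] = [] := by
  simp [pvScanP]

theorem pvScanP_cons_some {ps : List (List Char × List Char)} {c : Char} {t k v : List Char}
    (h : pvMatch ps (c :: t) = some (k, v)) (hk : k ≠ []) :
    pvScanP ps (c :: t) = v ++ pvScanP ps ((c :: t).drop k.length) := by
  have hmax : max k.length 1 = k.length := by
    have : 0 < k.length := List.length_pos_iff.mpr hk
    omega
  rw [pvScanP, h]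
  simp [hmax]

theorem pvScanP_cons_none {ps : List (List Char × List Char)} {c : Char} {t : List Char}
    (h : pvMatch ps (c :: t) = none) : pvScanP ps (c :: t) = c :: pvScanP ps t := by
  rw [pvScanP, h]

-- ==== PULL: fold over keys commutes with an unmatched head character ====

theorem pvFold_pull (c : Char) : ∀ (ps : List (List Char × List Char)) (t : List Char),
    (∀ pre p post, ps = pre ++ p :: post → ¬ p.1 <+: (c :: pvFold pre t)) →
    pvFold ps (c :: t) = c :: pvFold ps t := by
  intro ps
  induction ps with
  | nil => intro t _; rfl
  | cons p ps' ih =>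
    intro t H
    have h0 : ¬ p.1 <+: (c :: t) := by
      have := H [] p ps' rfl
      simpa [pvFold] using this
    rw [pvFold_cons_step, pvRepl_cons_neg p.2 c t h0, pvFold_cons_step]
    exact ih (pvRepl p.1 p.2 t)
      (fun pre q post hps => by
        have := H (p :: pre) q post (by simp [hps])
        simpa [pvFold_cons_step] using this)

-- ==== fold passes through an untouched key-shaped block / an emitted value char ====

theorem pvFold_block {k : List Char} :
    ∀ (pre : List (List Char × List Char)) (t : List Char),
    (∀ p ∈ pre, ∀ q < k.length, ∀ b, ¬ p.1 <+: (k.drop q ++ b)) →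
    pvFold pre (k ++ t) = k ++ pvFold pre t := by
  intro pre
  induction pre with
  | nil => intro t _; rfl
  | cons p pre' ih =>
    intro t h
    rw [pvFold_cons_step, pvRepl_append_left p.1 p.2 k t
      (fun q hq b' => h p (by simp) q hq b'), pvFold_cons_step]
    exact ih (pvRepl p.1 p.2 t) (fun p' hp' => h p' (by simp [hp']))

theorem pvFold_valchar {ch : Char} :
    ∀ (post : List (List Char × List Char)) (Z : List Char),
    (∀ p ∈ post, p.1 ≠ [] ∧ p.1.head? ≠ some ch) →
    pvFold post (ch :: Z) = ch :: pvFold post Z := by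
  intro post
  induction post with
  | nil => intro Z _; rfl
  | cons p post' ih =>
    intro Z h
    obtain ⟨hne, hhd⟩ := h p (by simp)
    have h0 : ¬ p.1 <+: (ch :: Z) := by
      intro hp
      cases hk : p.1 with
      | nil => exact hne hk
      | cons a as =>
        rw [hk] at hp
        have := (List.cons_prefix_cons.mp hp).1
        rw [hk] at hhd
        simp [this] at hhd
    rw [pvFold_cons_step, pvRepl_cons_neg p.2 ch Z h0, pvFold_cons_step]
    exact ih (pvRepl p.1 p.2 Z) (fun p' hp' => h p' (by simp [hp']))

-- ==== REFL: a prefix of the scanner's output is a prefix of the input, or exposes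
--      a replaced value character sitting right after copied original characters ====

theorem pvScanP_prefix {ps : List (List Char × List Char)}
    (hv : ∀ p ∈ ps, p.2.length = 1) (hkne : ∀ p ∈ ps, p.1 ≠ []) :
    ∀ t u, u <+: pvScanP ps t →
      u <+: t ∨ ∃ w k' v', (k', v') ∈ ps ∧ w ++ v' <+: u ∧ w ++ k' <+: t := by
  intro t
  induction t with
  | nil =>
    intro u h
    rw [pvScanP_nil] at h
    exact Or.inl (by simpa using h)
  | cons c t' ih =>
    intro u h
    cases hm : pvMatch ps (c :: t') with
    | some kv =>
      obtain ⟨k, v⟩ := kv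
      obtain ⟨hmem, hpre⟩ := pvMatch_some ps (c :: t') k v hm
      cases hu : u with
      | nil => exact Or.inl (List.nil_prefix)
      | cons uc ut =>
        subst hu
        have hk : k ≠ [] := hkne (k, v) hmem
        rw [pvScanP_cons_some hm hk] at h
        have hv1 : v.length = 1 := hv (k, v) hmem
        have hvu : v <+: (uc :: ut) := by
          refine List.prefix_of_prefix_length_le (v.prefix_append _) h ?_
          simp [hv1]
        exact Or.inr ⟨[], k, v, hmem, by simpa using hvu, by simpa using hpre⟩
    | none =>
      rw [pvScanP_cons_none hm] at h
      cases hu : u with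
      | nil => exact Or.inl (List.nil_prefix)
      | cons uc ut =>
        subst hu
        obtain ⟨hc, hut⟩ := List.cons_prefix_cons.mp h
        subst hc
        rcases ih ut hut with h1 | ⟨w, k', v', hmem, hwv, hwk⟩
        · exact Or.inl (List.cons_prefix_cons.mpr ⟨rfl, h1⟩)
        · exact Or.inr ⟨uc :: w, k', v', hmem,
            List.cons_prefix_cons.mpr ⟨rfl, hwv⟩, List.cons_prefix_cons.mpr ⟨rfl, hwk⟩⟩

-- ==== MAIN: on cascade-free input the sequential fold equals the one-pass scan ====

theorem pvFold_id : ∀ (qs : List (List Char × List Char)) (l : List Char),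
    (∀ p ∈ qs, '(' ∈ p.1) → '(' ∉ l → pvFold qs l = l := by
  intro qs
  induction qs with
  | nil => intro l _ _; rfl
  | cons p qs' ih =>
    intro l h hl
    rw [pvFold_cons_step, pvRepl_id p.1 p.2 l ?_]
    · exact ih l (fun p' hp' => h p' (by simp [hp'])) hl
    · intro q hq
      exact hl (List.drop_subset q l (hq.subset (h p (by simp))))

theorem pvRepl_front {k v X : List Char} (hk : k ≠ []) :
    pvRepl k v (k ++ X) = v ++ pvRepl k v X := by
  cases k with
  | nil => exact absurd rfl hk
  | cons c k' =>
    rw [List.cons_append, pvRepl_cons_pos v c (k' ++ X) hk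
      (List.cons_prefix_cons.mpr ⟨rfl, k'.prefix_append X⟩)]
    congr 1
    simp

theorem pvMain_aux : ∀ (n : Nat) (l : List Char), l.length ≤ n → pvNoCascade l →
    ∀ ps, ps <+: pvPairs → pvFold ps l = pvScanP ps l := by
  intro n
  induction n with
  | zero =>
    intro l hl _ ps _
    have hnil : l = [] := by cases l with | nil => rfl | cons c t => simp at hl
    subst hnil
    rw [pvFold_nil, pvScanP_nil]
  | succ n ih =>
    intro l hl hnc ps hps
    have hsub : ∀ p ∈ ps, p ∈ pvPairs := fun p hp => hps.sublist.subset hp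
    cases hm : pvMatch ps l with
    | some kv =>
      obtain ⟨k, v⟩ := kv
      obtain ⟨pre, post, hsplit, hpreno, hkpre⟩ := pvMatch_some_split ps l k v hm
      obtain ⟨t, ht⟩ := hkpre
      have hkmem : (k, v) ∈ pvPairs := hsub _ (by rw [hsplit]; simp)
      have hkne : k ≠ [] := pvPairs_key_ne_nil _ hkmem
      have hklen : 0 < k.length := List.length_pos_iff.mpr hkne
      have hpre_mem : ∀ p ∈ pre, p ∈ pvPairs := fun p hp => hsub p (by rw [hsplit]; simp [hp])
      have hpost_mem : ∀ p ∈ post, p ∈ pvPairs := fun p hp => hsub p (by rw [hsplit]; simp [hp])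
      have hblock : ∀ p ∈ pre, ∀ q < k.length, ∀ b, ¬ p.1 <+: (k.drop q ++ b) := by
        intro p hp q hq b
        have hne : p.1 ≠ k := by
          intro he
          exact hpreno p hp (by rw [he, ← ht]; exact k.prefix_append t)
        have hsep := pvSep (k, v) hkmem p (hpre_mem p hp) (fun he => hne he.symm) q hq
        exact pv_not_prefix_append hsep.1 hsep.2 b
      have hv1 : v.length = 1 := pvVal_len (k, v) hkmem
      obtain ⟨ch, hch⟩ : ∃ ch, v = [ch] := by
        cases v with
        | nil => simp at hv1
        | cons a as => cases as with
          | nil => exact ⟨a, rfl⟩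
          | cons b bs => simp at hv1
      have hnodup_ps : ps.Nodup := pvNodup.sublist hps.sublist
      have hkv_not_post : (k, v) ∉ post := by
        rw [hsplit] at hnodup_ps
        exact (List.nodup_cons.mp hnodup_ps.of_append_right).1
      have hpost_hyp : ∀ p ∈ post, p.1 ≠ [] ∧ p.1.head? ≠ some ch := by
        intro p hp
        refine ⟨pvPairs_key_ne_nil _ (hpost_mem p hp), ?_⟩
        have hne : (k, v) ≠ p := fun he => hkv_not_post (he ▸ hp)
        have := pvHeadNe (k, v) hkmem p (hpost_mem p hp) hne
        rw [hch] at this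
        simpa using this
      -- IH ingredients
      have htlen : t.length ≤ n := by
        have : l.length = k.length + t.length := by rw [← ht]; simp
        omega
      have htnc : pvNoCascade t := by
        have := pvNoCascade_drop hnc k.length
        rwa [← ht, List.drop_left] at this
      have hiht : pvFold ps t = pvScanP ps t := ih t htlen htnc ps hps
      -- fold side
      have hfold : pvFold ps l = v ++ pvFold ps t := by
        subst hch
        have e1 : pvFold ps (k ++ t) = ch :: pvFold ps t := by
          conv_lhs => rw [hsplit]
          conv_rhs => rw [hsplit]
          rw [pvFold_append, pvFold_cons_step', pvFold_block pre t hblock, pvRepl_front hkne,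
              List.singleton_append, pvFold_valchar post _ hpost_hyp, pvFold_append,
              pvFold_cons_step']
        rw [← ht, e1]
        rfl
      -- scan side
      cases hlc : l with
      | nil => exact absurd (hlc ▸ ht) (by simp [hkne])
      | cons c t0 =>
        rw [hlc] at hm
        have hdrop : (c :: t0).drop k.length = t := by
          rw [← hlc, ← ht, List.drop_left]
        rw [← hlc, hfold, hiht, hlc, pvScanP_cons_some hm hkne, hdrop]
    | none =>
      cases hlc : l with
      | nil => rw [pvFold_nil, pvScanP_nil]
      | cons c t =>
        subst hlc
        have hIHt : ∀ qs, qs <+: pvPairs → pvFold qs t = pvScanP qs t := by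
          intro qs h
          refine ih t (by simp at hl; omega) ?_ qs h
          have := pvNoCascade_drop hnc 1
          simpa using this
        rw [pvScanP_cons_none hm]
        rw [pvFold_pull c ps t ?_, hIHt ps hps]
        intro pre p post hsplit
        have hpre_prefix : pre <+: pvPairs := (pre.prefix_append (p :: post)).trans (hsplit ▸ hps)
        rw [hIHt pre hpre_prefix]
        intro hcon
        have hpmem : p ∈ ps := by rw [hsplit]; simp
        have hnp : ¬ p.1 <+: (c :: t) := pvMatch_none ps (c :: t) hm p hpmem
        have hpx : p ∈ pvPairs := hsub p hpmem
        have hpne : p.1 ≠ [] := pvPairs_key_ne_nil _ hpx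
        cases hp1 : p.1 with
        | nil => exact hpne hp1
        | cons pc pu =>
          rw [hp1] at hcon
          obtain ⟨hc0, hupre⟩ := List.cons_prefix_cons.mp hcon
          subst hc0
          have hvpre : ∀ p' ∈ pre, p'.2.length = 1 := fun p' hp' =>
            pvVal_len p' (hsub p' (by rw [hsplit]; simp [hp']))
          have hkpre' : ∀ p' ∈ pre, p'.1 ≠ [] := fun p' hp' =>
            pvPairs_key_ne_nil p' (hsub p' (by rw [hsplit]; simp [hp']))
          rcases pvScanP_prefix hvpre hkpre' t pu hupre with hleft | ⟨w, k', v', hmem', hwv, hwk⟩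
          · exact hnp (by rw [hp1]; exact List.cons_prefix_cons.mpr ⟨rfl, hleft⟩)
          · have hy : (k', v') ∈ pvPairs := hsub (k', v') (by rw [hsplit]; simp [hmem'])
            have hv'1 : v'.length = 1 := pvVal_len (k', v') hy
            have hwlen : w.length + 1 ≤ pu.length := by
              have := hwv.length_le
              simp [hv'1] at this
              omega
            have ha_lt : w.length + 1 < p.1.length := by rw [hp1]; simp; omega
            have hwpu : w <+: pu := (w.prefix_append v').trans hwv
            have hdropA : v' <+: p.1.drop (w.length + 1) := by
              rw [hp1, List.drop_succ_cons]
              have h2 := hwv.drop w.length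
              rwa [List.drop_left] at h2
            have htake : p.1.take (w.length + 1) = pc :: w := by
              rw [hp1, List.take_succ_cons]
              congr 1
              exact (List.prefix_iff_eq_take.mp hwpu).symm
            have hcp := pvCF p hpx (k', v') hy (w.length + 1) (by omega) ha_lt hdropA
            rw [htake] at hcp
            have hpat : (pc :: w) ++ k' <+: (pc :: t) := by
              rw [List.cons_append]
              exact List.cons_prefix_cons.mpr ⟨rfl, hwk⟩
            exact pvCascade_mono hcp hpat hnc

theorem pvMain : ∀ (l : List Char), pvNoCascade l →
    ∀ ps, ps <+: pvPairs → pvFold ps l = pvScanP ps l :=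
  fun l hnc ps hps => pvMain_aux l.length l le_rfl hnc ps hps

theorem pvScan_nil : pvScan [] = [] := by
  rw [pvScan]
  split
  · rename_i k v heq
    simp [pvMatch, pvPairs] at heq
  · rfl

theorem pvScan_some {l k v : List Char} (h : pvMatch pvPairs l = some (k, v)) :
    pvScan l = v ++ pvScan (l.drop k.length) := by
  rw [pvScan]
  split
  · rename_i k' v' heq
    rw [h] at heq
    cases heq
    rfl
  · rename_i heq
    rw [h] at heq
    cases heq

theorem pvScan_none_cons {c : Char} {t : List Char} (h : pvMatch pvPairs (c :: t) = none) :
    pvScan (c :: t) = c :: pvScan t := by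
  rw [pvScan]
  split
  · rename_i k' v' heq
    rw [h] at heq
    cases heq
  · rfl

theorem pvScan_eq_scanP_aux : ∀ (n : Nat) (l : List Char), l.length ≤ n →
    pvScan l = pvScanP pvPairs l := by
  intro n
  induction n with
  | zero =>
    intro l hl
    have hnil : l = [] := by cases l with | nil => rfl | cons c t => simp at hl
    subst hnil
    rw [pvScan_nil, pvScanP_nil]
  | succ n ih =>
    intro l hl
    cases hm : pvMatch pvPairs l with
    | some kv =>
      obtain ⟨k, v⟩ := kv
      obtain ⟨hmem, hpre⟩ := pvMatch_some pvPairs l k v hm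
      have hkne : k ≠ [] := pvPairs_key_ne_nil _ hmem
      have hklen : 0 < k.length := List.length_pos_iff.mpr hkne
      have hlne : l ≠ [] := by
        intro h0
        rw [h0] at hpre
        exact hkne (List.prefix_nil.mp hpre)
      cases hlc : l with
      | nil => exact absurd hlc hlne
      | cons c t =>
        subst hlc
        rw [pvScan_some hm, pvScanP_cons_some hm hkne]
        congr 1
        refine ih _ ?_
        simp only [List.length_drop, List.length_cons] at *
        omega
    | none =>
      cases hlc : l with
      | nil => rw [pvScan_nil, pvScanP_nil]
      | cons c t =>
        subst hlc
        rw [pvScan_none_cons hm, pvScanP_cons_none hm]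
        congr 1
        refine ih t ?_
        simp only [List.length_cons] at hl
        omega

theorem pvScan_eq_scanP : ∀ l, pvScan l = pvScanP pvPairs l :=
  fun l => pvScan_eq_scanP_aux l.length l le_rfl

-- ==== bridge: port A's string loop is the char-level fold ====

theorem pvParen_infix {l : List Char} (h : '(' ∈ l) : ['('] <:+: l := by
  obtain ⟨s, t, rfl⟩ := List.append_of_mem h
  exact ⟨s, t, by simp⟩

theorem pvReplace_go_eq (old new : List Char) (hne : old ≠ []) :
    ∀ (fuel : Nat) (l acc : List Char), l.length ≤ fuel →
    PySem.Chars.replace.go old new fuel l acc = acc.reverse ++ pvRepl old new l := by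
  intro fuel
  induction fuel with
  | zero =>
    intro l acc hl
    have hnil : l = [] := by cases l with | nil => rfl | cons c t => simp at hl
    subst hnil
    rw [PySem.Chars.replace.go, pvRepl_nil]
  | succ fuel ih =>
    intro l acc hl
    cases l with
    | nil =>
      rw [PySem.Chars.replace.go, pvRepl_nil]
      · simp
      · omega
    | cons c t =>
      rw [PySem.Chars.replace.go]
      by_cases hp : old.isPrefixOf (c :: t)
      · rw [if_pos hp]
        have hp' : old <+: (c :: t) := List.isPrefixOf_iff_prefix.mp hp
        have hlen : ((c :: t).drop old.length).length ≤ fuel := by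
          have h0 : 0 < old.length := List.length_pos_iff.mpr hne
          simp only [List.length_drop, List.length_cons] at *
          omega
        rw [ih _ _ hlen, pvRepl_cons_pos new c t hne hp']
        simp
      · rw [if_neg hp]
        have hlen : t.length ≤ fuel := by simp at hl; omega
        rw [ih t (c :: acc) hlen,
          pvRepl_cons_neg new c t (fun hh => hp (List.isPrefixOf_iff_prefix.mpr hh))]
        simp

theorem pvReplace_eq (l old new : List Char) (hne : old ≠ []) :
    PySem.Chars.replace l old new = pvRepl old new l := by
  rw [PySem.Chars.replace]
  rw [if_neg (by simp [hne])]
  simpa using pvReplace_go_eq old new hne l.length l [] le_rfl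

theorem pvLoopA_eq : ∀ (ps : List (String × String)) (s : String),
    (∀ p ∈ ps, '(' ∈ p.1.toList ∧ p.1.toList ≠ []) →
    (pvLoopA ps s).toList = pvFold (ps.map (fun p => (p.1.toList, p.2.toList))) s.toList := by
  intro ps
  induction ps with
  | nil => intro s _; rfl
  | cons p rest ih =>
    intro s h
    obtain ⟨k, v⟩ := p
    by_cases hin : PySem.Str.isIn "(" s = false
    · rw [pvLoopA, if_pos hin]
      have hnp : '(' ∉ s.toList := by
        intro hmem
        have hfalse : PySem.Chars.isIn "(".toList s.toList = false := by
          rw [← PySem.Str.isIn_eq]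
          exact hin
        rw [PySem.Chars.isIn_eq_false_iff] at hfalse
        exact hfalse (pvParen_infix hmem)
      rw [pvFold_id _ _ ?_ hnp]
      intro p' hp'
      obtain ⟨p0, hp0, rfl⟩ := List.mem_map.mp hp'
      exact (h p0 hp0).1
    · rw [pvLoopA, if_neg hin]
      rw [ih _ (fun p0 hp0 => h p0 (by simp [hp0]))]
      rw [List.map_cons, pvFold_cons_step']
      congr 1
      rw [PySem.Str.toList_replace]
      exact pvReplace_eq s.toList k.toList v.toList (h (k, v) (by simp)).2

-- ===== VERDICT (by name: the statement is the Claim_ definition above) =====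
set_option maxHeartbeats 1000000 in
theorem unimod_to_single_char_sequence_spec : Claim_equal_unimod_to_single_char_sequence := by
  intro seq ig hdom hpre
  obtain ⟨hnc, -⟩ := hpre
  unfold Spec_unimod_to_single_char_sequence
  simp only [unimod_to_single_char_sequence, unimod_to_single_char_sequence_alt]
  set s0 := PySem.Str.stripChars (PySem.Str.strip seq) "_"
  have hmapok : ∀ p ∈ pvMap, '(' ∈ p.1.toList ∧ p.1.toList ≠ [] := by decide
  have hmapeq : pvMap.map (fun p => (p.1.toList, p.2.toList)) = pvPairs := by decide
  have hAlist : (pvLoopA pvMap s0).toList = pvScan s0.toList := by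
    rw [pvLoopA_eq pvMap s0 hmapok, hmapeq,
      pvMain s0.toList hnc pvPairs (List.prefix_refl _), ← pvScan_eq_scanP]
  have hsval : pvLoopA pvMap s0 = String.ofList (pvScan s0.toList) := by
    rw [← hAlist, String.ofList_toList]
  simp only [hsval]
  rw [PySem.Str.isIn_eq]
  simp only [String.toList_ofList]
  cases hc : PySem.Chars.isIn ['('] (pvScan s0.toList) <;> simp [hc]
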